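-- pv_equiv track=rewrite | github.com/roman-dvorak/ITIN | inventory/migrations/0016_os_catalog_refactor.py | _split_name_flavor
-- ===== SOURCE A (Python) =====
-- def _split_name_flavor(name: str):
--     flavor_candidates = ("pro", "home", "enterprise", "server", "desktop")
--     source = (name or "").strip()
--     lowered = source.lower()
--     for flavor in flavor_candidates:
--         suffix = f" {flavor}"
--         if lowered.endswith(suffix):
--             base = source[: -len(suffix)].strip()
--             if base:
--                 return base, flavor.capitalize()
--     return source, None
-- ===== SOURCE B (Python) =====
-- _FLAVORS = frozenset(("pro", "home", "enterprise", "server", "desktop"))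
--
--
-- def _split_name_flavor(name: str):
--     source = (name or "").strip()
--     prefix, sep, last = source.rpartition(" ")
--     low = last.lower()
--     if sep and low in _FLAVORS:
--         base = prefix.strip()
--         if base:
--             return base, low.capitalize()
--     return source, None
-- ===== Notes on version B (the rewrite author's own statement) =====
-- stated objective: idiomatic
-- what changed: Replaces A's loop of five lowercase-endswith scans by a single rpartition at the last space followed by a frozenset membership test of the last token.
import Mathlib
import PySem

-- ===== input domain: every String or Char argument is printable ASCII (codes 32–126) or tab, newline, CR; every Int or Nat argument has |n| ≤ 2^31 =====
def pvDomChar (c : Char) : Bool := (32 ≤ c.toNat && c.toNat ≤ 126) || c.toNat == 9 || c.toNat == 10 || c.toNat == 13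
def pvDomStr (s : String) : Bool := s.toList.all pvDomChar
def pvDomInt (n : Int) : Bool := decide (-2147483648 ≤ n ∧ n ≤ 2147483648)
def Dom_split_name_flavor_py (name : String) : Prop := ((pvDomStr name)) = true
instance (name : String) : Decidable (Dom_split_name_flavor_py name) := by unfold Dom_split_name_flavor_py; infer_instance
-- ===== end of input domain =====

-- B replaces A's loop of five endswith scans by one rpartition at the last space plus a set
-- membership test (objective: idiomatic; same asymptotic cost).

-- ===== PORT A =====
-- str.capitalize, exact on ASCII (both Pythons call it on pure-ASCII flavor words)
def pyCapitalize (s : List Char) : List Char :=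
  match s with
  | [] => []
  | c :: cs => PySem.Chars.upperChar c :: PySem.Chars.lower cs

def pvAFlavors : List (List Char) :=
  [['p','r','o'], ['h','o','m','e'], ['e','n','t','e','r','p','r','i','s','e'],
   ['s','e','r','v','e','r'], ['d','e','s','k','t','o','p']]

def pvALoop (source lowered : List Char) : List (List Char) → String × Option String
  | [] => (String.ofList source, none)
  | f :: fs =>
    let suffix := ' ' :: f
    if PySem.Chars.endswith lowered suffix then
      let base := PySem.Chars.strip
        (PySem.List.slice source none (some (-(PySem.Chars.len suffix : Int))))
      if base ≠ [] then (String.ofList base, some (String.ofList (pyCapitalize f)))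
      else pvALoop source lowered fs
    else pvALoop source lowered fs

def split_name_flavor_py (name : String) : String × Option String :=
  let source := PySem.Chars.strip (if name = "" then [] else name.toList)
  let lowered := PySem.Chars.lower source
  pvALoop source lowered pvAFlavors

-- ===== PORT B =====
def pvBFlavorSet : PySem.Set (List Char) :=
  PySem.Set.ofList
    [['p','r','o'], ['h','o','m','e'], ['e','n','t','e','r','p','r','i','s','e'],
     ['s','e','r','v','e','r'], ['d','e','s','k','t','o','p']]

-- str.rpartition(" "), hand-ported exactly for the one-char " " separator:
-- some (before-last-space, after-last-space) when a space exists (sep truthy), none otherwise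
def pvRPartSp : List Char → Option (List Char × List Char)
  | [] => none
  | c :: cs =>
    match pvRPartSp cs with
    | some (p, t) => some (c :: p, t)
    | none => if c = ' ' then some ([], cs) else none

def split_name_flavor_py_alt (name : String) : String × Option String :=
  let source := PySem.Chars.strip (if name = "" then [] else name.toList)
  match pvRPartSp source with
  | some (pre, last) =>
    let low := PySem.Chars.lower last
    if pvBFlavorSet.contains low then
      let base := PySem.Chars.strip pre
      if base ≠ [] then (String.ofList base, some (String.ofList (pyCapitalize low)))
      else (String.ofList source, none)
    else (String.ofList source, none)
  | none => (String.ofList source, none)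

-- ===== PRECONDITION & SPEC =====
def Spec_split_name_flavor_py (name : String) (out : String × Option String) : Prop := out = split_name_flavor_py_alt name
instance (name : String) (out : String × Option String) : Decidable (Spec_split_name_flavor_py name out) := by unfold Spec_split_name_flavor_py; infer_instance

-- ===== CLAIM (what is proved, stated in full; the proofs are below) =====
def Claim_equal_split_name_flavor_py : Prop := ∀ (name : String), Dom_split_name_flavor_py name → Spec_split_name_flavor_py name (split_name_flavor_py name)

-- ===== LEMMAS AND PROOFS =====

theorem pvLowerChar_eq_space {c : Char} : PySem.Chars.lowerChar c = ' ' ↔ c = ' ' := by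
  constructor
  · intro h
    unfold PySem.Chars.lowerChar PySem.Chars.isupper at h
    split_ifs at h with hu
    · exfalso
      rw [Bool.and_eq_true, decide_eq_true_eq, decide_eq_true_eq] at hu
      have hA : ('A' : Char).val ≤ c.val := hu.1
      have hZ : c.val ≤ ('Z' : Char).val := hu.2
      rw [UInt32.le_iff_toNat_le] at hA hZ
      simp only [Char.toNat_val] at hA hZ
      have hA' : 65 ≤ c.toNat := by simpa using hA
      have hZ' : c.toNat ≤ 90 := by simpa using hZ
      have hv : (c.toNat + 32).isValidChar := Or.inl (by omega)
      have h32 := congrArg Char.toNat h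
      rw [Char.toNat_ofNat, if_pos hv] at h32
      simp only [show (' ' : Char).toNat = 32 from rfl] at h32
      omega
    · exact h
  · intro h; subst h; decide

theorem pvSpace_mem_lower {t : List Char} : ' ' ∈ PySem.Chars.lower t ↔ ' ' ∈ t := by
  unfold PySem.Chars.lower
  constructor
  · intro h
    obtain ⟨c, hc, he⟩ := List.mem_map.1 h
    rwa [pvLowerChar_eq_space.1 he] at hc
  · intro h
    exact List.mem_map.2 ⟨' ', h, by decide⟩

theorem pvRPart_none {s : List Char} : pvRPartSp s = none ↔ ' ' ∉ s := by
  induction s with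
  | nil => simp [pvRPartSp]
  | cons c cs ih =>
    simp only [pvRPartSp]
    cases h : pvRPartSp cs with
    | some pt =>
      constructor
      · intro hc; cases hc
      · intro hns
        exfalso
        have : ' ' ∈ cs := by
          by_contra hn
          rw [ih.2 hn] at h; cases h
        exact hns (List.mem_cons_of_mem _ this)
    | none =>
      have hns : ' ' ∉ cs := ih.1 h
      by_cases hc : c = ' '
      · subst hc; simp [hns]
      · simp [hc, hns, Ne.symm hc]

theorem pvRPart_some {s p t : List Char} (h : pvRPartSp s = some (p, t)) :
    s = p ++ ' ' :: t ∧ ' ' ∉ t := by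
  induction s generalizing p t with
  | nil => simp [pvRPartSp] at h
  | cons c cs ih =>
    simp only [pvRPartSp] at h
    cases hcs : pvRPartSp cs with
    | some pt =>
      rw [hcs] at h
      obtain ⟨p', t'⟩ := pt
      simp only [Option.some.injEq, Prod.mk.injEq] at h
      obtain ⟨hp, ht⟩ := h
      obtain ⟨rfl, hnt⟩ := ih hcs
      subst ht
      cases hp
      exact ⟨rfl, hnt⟩
    | none =>
      rw [hcs] at h
      by_cases hc : c = ' '
      · subst hc
        rw [if_pos rfl] at h
        obtain ⟨rfl, rfl⟩ := by simpa using h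
        exact ⟨rfl, pvRPart_none.1 hcs⟩
      · simp [hc] at h

theorem pvSuffix_unique {u f g : List Char} (hf : ' ' ∉ f) (hg : ' ' ∉ g)
    (h1 : (' ' :: f) <:+ u) (h2 : (' ' :: g) <:+ u) : f = g := by
  have key : ∀ {x y : List Char}, ' ' ∉ y → (' ' :: x) <:+ (' ' :: y) → x = y := by
    intro x y hy h
    rcases h with ⟨w, hw⟩
    cases w with
    | nil => simpa using hw
    | cons a as =>
      exfalso
      apply hy
      have hyeq : as ++ ' ' :: x = y := by
        have := congrArg List.tail hw
        simpa using this
      rw [← hyeq]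
      exact List.mem_append_right _ List.mem_cons_self
  rcases List.suffix_or_suffix_of_suffix h1 h2 with h | h
  · exact key hg h
  · exact (key hf h).symm

theorem pvEndswith_nospace {s f : List Char} (hs : ' ' ∉ s) :
    PySem.Chars.endswith (PySem.Chars.lower s) (' ' :: f) = false := by
  rw [Bool.eq_false_iff]
  intro h
  have hsuf := (PySem.Chars.endswith_iff _ _).1 h
  have : ' ' ∈ PySem.Chars.lower s := hsuf.subset List.mem_cons_self
  exact hs (pvSpace_mem_lower.1 this)

theorem pvLower_append (p q : List Char) :
    PySem.Chars.lower (p ++ q) = PySem.Chars.lower p ++ PySem.Chars.lower q := by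
  simp [PySem.Chars.lower]

theorem pvLowerChar_space : PySem.Chars.lowerChar ' ' = ' ' := by decide

theorem pvEndswith_char {p t f : List Char} (ht : ' ' ∉ t) (hf : ' ' ∉ f) :
    PySem.Chars.endswith (PySem.Chars.lower (p ++ ' ' :: t)) (' ' :: f)
      = decide (PySem.Chars.lower t = f) := by
  have hlt : ' ' ∉ PySem.Chars.lower t := fun h => ht (pvSpace_mem_lower.1 h)
  have hdecomp : PySem.Chars.lower (p ++ ' ' :: t)
      = PySem.Chars.lower p ++ ' ' :: PySem.Chars.lower t := by
    rw [show (' ' :: t) = [' '] ++ t from rfl, pvLower_append, pvLower_append]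
    simp [PySem.Chars.lower, pvLowerChar_space]
  by_cases heq : PySem.Chars.lower t = f
  · simp only [heq, decide_true]
    rw [PySem.Chars.endswith_iff, ← heq, hdecomp]
    exact ⟨PySem.Chars.lower p, rfl⟩
  · simp only [heq, decide_false]
    rw [Bool.eq_false_iff]
    intro h
    apply heq
    have h1 := (PySem.Chars.endswith_iff _ _).1 h
    have h2 : (' ' :: PySem.Chars.lower t) <:+ PySem.Chars.lower (p ++ ' ' :: t) := by
      rw [hdecomp]; exact ⟨PySem.Chars.lower p, rfl⟩
    exact pvSuffix_unique hlt hf h2 h1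

theorem pvSlice_neg (p t : List Char) (c : Char) :
    PySem.List.slice (p ++ c :: t) none (some (-((t.length : Int) + 1))) = p := by
  unfold PySem.List.slice PySem.List.clampIdx
  have hlen : (p ++ c :: t).length = p.length + t.length + 1 := by
    simp [List.length_append]; omega
  simp only [hlen, List.drop_zero, Nat.sub_zero]
  rw [if_pos (show -((t.length : Int) + 1) < 0 by omega)]
  rw [if_neg (show ¬ (((p.length + t.length + 1 : Nat) : Int) + -((t.length : Int) + 1) < 0) by
    push_cast; omega)]
  have harg : (((p.length + t.length + 1 : Nat) : Int) + -((t.length : Int) + 1)).toNat = p.length := by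
    push_cast; omega
  rw [harg]
  simp

theorem pvLower_length (t : List Char) :
    (PySem.Chars.lower t).length = t.length := by
  simp [PySem.Chars.lower]

-- A's candidate loop, over any list of space-free flavor words, is "last-token lookup"
theorem pvLoopEq (p t : List Char) (ht : ' ' ∉ t) (L : List (List Char))
    (hL : ∀ f ∈ L, ' ' ∉ f) :
    pvALoop (p ++ ' ' :: t) (PySem.Chars.lower (p ++ ' ' :: t)) L =
      if PySem.Chars.lower t ∈ L then
        (if PySem.Chars.strip p ≠ [] then
          (String.ofList (PySem.Chars.strip p),
           some (String.ofList (pyCapitalize (PySem.Chars.lower t))))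
         else (String.ofList (p ++ ' ' :: t), none))
      else (String.ofList (p ++ ' ' :: t), none) := by
  induction L with
  | nil => simp [pvALoop]
  | cons f fs ih =>
    have hf : ' ' ∉ f := hL f (by simp)
    have hfs : ∀ g ∈ fs, ' ' ∉ g := fun g hg => hL g (by simp [hg])
    simp only [pvALoop]
    rw [pvEndswith_char ht hf]
    by_cases hlt : PySem.Chars.lower t = f
    · have hflen : (PySem.Chars.len (' ' :: f) : Int) = (t.length : Int) + 1 := by
        have : f.length = t.length := by rw [← hlt, pvLower_length]
        simp [PySem.Chars.len, this]
      simp only [hlt, decide_true, if_true]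
      rw [hflen, pvSlice_neg p t ' ']
      by_cases hb : PySem.Chars.strip p = []
      · simp only [hb, ne_eq, not_true_eq_false, if_false]
        rw [ih hfs]
        simp [hb]
      · simp [hb]
    · simp only [hlt, decide_false, Bool.false_eq_true, if_false]
      rw [ih hfs]
      have hmem : (PySem.Chars.lower t ∈ f :: fs) ↔ (PySem.Chars.lower t ∈ fs) := by
        simp [hlt]
      by_cases hm : PySem.Chars.lower t ∈ fs
      · simp [hm, hlt]
      · simp [hm, hlt]

theorem pvContains_iff (low : List Char) :
    pvBFlavorSet.contains low = true ↔ low ∈ pvAFlavors := by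
  show (List.contains (pvBFlavorSet : List (List Char)) low = true) ↔ _
  rw [List.contains_iff_mem]
  rfl

-- the heart: for every char list s, A's candidate loop equals B's rpartition-and-lookup
theorem pvCore (s : List Char) :
    pvALoop s (PySem.Chars.lower s) pvAFlavors
      = (match pvRPartSp s with
         | some (pre, last) =>
           let low := PySem.Chars.lower last
           if pvBFlavorSet.contains low then
             let base := PySem.Chars.strip pre
             if base ≠ [] then (String.ofList base, some (String.ofList (pyCapitalize low)))
             else (String.ofList s, none)
           else (String.ofList s, none)
         | none => (String.ofList s, none)) := by
  cases hrp : pvRPartSp s with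
  | none =>
    have hns : ' ' ∉ s := pvRPart_none.1 hrp
    simp [pvALoop, pvAFlavors, pvEndswith_nospace hns]
  | some pt =>
    obtain ⟨p, t⟩ := pt
    obtain ⟨rfl, ht⟩ := pvRPart_some hrp
    have hall : ∀ f ∈ pvAFlavors, ' ' ∉ f := by decide
    rw [pvLoopEq p t ht pvAFlavors hall]
    by_cases hm : PySem.Chars.lower t ∈ pvAFlavors
    · have hc : pvBFlavorSet.contains (PySem.Chars.lower t) = true := (pvContains_iff _).2 hm
      simp only [hm, if_true, hc]
    · have hc : pvBFlavorSet.contains (PySem.Chars.lower t) = false := by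
        rw [Bool.eq_false_iff]
        intro h
        exact hm ((pvContains_iff _).1 h)
      simp only [hm, if_false, hc, Bool.false_eq_true]

-- ===== VERDICT (by name: the statement is the Claim_ definition above) =====
theorem split_name_flavor_py_spec : Claim_equal_split_name_flavor_py := by
  intro name _
  unfold Spec_split_name_flavor_py split_name_flavor_py split_name_flavor_py_alt
  exact pvCore _
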